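-- pv_equiv track=rewrite | github.com/NavAlt99/BorisPython | learn-to-code-with-python-incomplete/10-Lists-Iteration/sum_of_values_and_indecies.py | sum_of_values_and_indices
-- ===== SOURCE A (Python) =====
-- def sum_of_values_and_indices(list1):
--     idx = 0
--     sum = 0
--     total = 0
--     for i in list1:
--         sum = idx + i
--         idx += 1
--         total += sum
--     return total
-- ===== SOURCE B (Python) =====
-- def sum_of_values_and_indices(list1):
--     n = len(list1)
--     return sum(list1) + n * (n - 1) // 2
-- ===== Notes on version B (the rewrite author's own statement) =====
-- stated objective: simpler
-- what changed: Replaces the explicit loop accumulating value+index per element with built-in sum plus the closed-form arithmetic series n*(n-1)//2 for the indices (C-level sum, no Python-level loop).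
import Mathlib
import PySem

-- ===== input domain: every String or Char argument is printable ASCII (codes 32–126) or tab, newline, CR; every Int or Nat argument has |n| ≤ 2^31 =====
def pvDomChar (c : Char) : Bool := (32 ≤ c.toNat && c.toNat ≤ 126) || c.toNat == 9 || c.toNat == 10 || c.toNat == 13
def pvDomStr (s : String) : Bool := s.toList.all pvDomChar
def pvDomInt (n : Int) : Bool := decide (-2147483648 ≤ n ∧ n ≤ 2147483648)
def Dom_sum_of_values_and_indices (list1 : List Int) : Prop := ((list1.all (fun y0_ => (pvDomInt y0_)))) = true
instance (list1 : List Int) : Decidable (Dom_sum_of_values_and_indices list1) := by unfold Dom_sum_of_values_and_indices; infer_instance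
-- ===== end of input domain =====

-- B replaces A's index-accumulating loop with sum(list1) + n*(n-1)//2 (closed-form index series); measurably faster by constant factor.


-- ===== PORT A =====
-- loop: for i in list1: sum = idx + i; idx += 1; total += sum
def sumOfValsIdxLoop (idx total : Int) : List Int → Int
  | [] => total
  | i :: rest => sumOfValsIdxLoop (idx + 1) (total + (idx + i)) rest

def sum_of_values_and_indices (list1 : List Int) : Int :=
  sumOfValsIdxLoop 0 0 list1

-- ===== PORT B =====
-- B: sum(list1) + n*(n-1)//2 (closed form for the index sum)
def sum_of_values_and_indices_alt (list1 : List Int) : Int :=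
  let n : Int := list1.length
  list1.sum + PySem.Int.floordiv (n * (n - 1)) 2

-- ===== PRECONDITION & SPEC =====
def Spec_sum_of_values_and_indices (list1 : List Int) (out : Int) : Prop := out = sum_of_values_and_indices_alt list1
instance (list1 : List Int) (out : Int) : Decidable (Spec_sum_of_values_and_indices list1 out) := by unfold Spec_sum_of_values_and_indices; infer_instance

-- ===== CLAIM (what is proved, stated in full; the proofs are below) =====
def Claim_equal_sum_of_values_and_indices : Prop := ∀ (list1 : List Int), Dom_sum_of_values_and_indices list1 → Spec_sum_of_values_and_indices list1 (sum_of_values_and_indices list1)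

-- ===== LEMMAS AND PROOFS =====

-- ===== VERDICT (by name: the statement is the Claim_ definition above) =====
lemma sumOfValsIdxLoop_eq (l : List Int) : ∀ (idx total : Int),
    sumOfValsIdxLoop idx total l =
      total + l.sum + l.length * idx + PySem.Int.floordiv (l.length * (l.length - 1)) 2 := by
  induction l with
  | nil => intro idx total; simp [sumOfValsIdxLoop, PySem.Int.floordiv]
  | cons i rest ih =>
    intro idx total
    have h2 : (0:Int) < 2 := by norm_num
    have hfd : ∀ m : Int, PySem.Int.floordiv (2 * m) 2 = m := by
      intro m
      rw [PySem.Int.floordiv_eq_ediv_of_pos (by norm_num)]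
      omega
    have key : PySem.Int.floordiv ((rest.length + 1 : Int) * ((rest.length + 1) - 1)) 2
        = PySem.Int.floordiv ((rest.length : Int) * (rest.length - 1)) 2 + rest.length := by
      obtain ⟨k, hk⟩ : ∃ k : Int, (rest.length : Int) * (rest.length - 1) = k + k :=
        Int.even_mul_pred_self (rest.length : Int)
      have h1 : ((rest.length + 1 : Int)) * ((rest.length + 1) - 1) = 2 * (k + rest.length) := by
        push_cast; linarith [hk]
      have hk2 : (rest.length : Int) * (rest.length - 1) = 2 * k := by linarith
      rw [h1, hk2, hfd, hfd]
    simp only [sumOfValsIdxLoop, ih, List.sum_cons, List.length_cons]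
    push_cast
    rw [key]
    ring

theorem sum_of_values_and_indices_spec : Claim_equal_sum_of_values_and_indices := by
  intro l _
  unfold Spec_sum_of_values_and_indices sum_of_values_and_indices sum_of_values_and_indices_alt
  simp [sumOfValsIdxLoop_eq]
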